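-- pv_equiv track=rewrite | github.com/u-siri-ous/various-acsai | esercizi python/difficoltà 3/50/program.py | es50
-- ===== SOURCE A (Python) =====
-- def es50(s,k):
--     '''
--     progettare la funzione es50(s,k) che:
--     - riceve  in input una stringa s di caratteri che sono le cifre da  '0' a '9'  ed un intero k
--     - costruisce la lista con  le diverse sottostringhe  di s  i cui caratteri sono in
--       ordine strattamente crescente.
--     - restituisce la lista dopo averne ordinato gli elementi in ordine decrescente
--    Nota che la lista non deve contenere duplicati.
--    Si ricorda che una sottostringa di s e' quello che si ottiene da s eliminando 0 o piu'
--    caratteri iniziali  e 0 o piu' caratteri finali.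
--    ESEMPI:
--    con  s='9135918246556' e k=3 la funzione restituisce la lista ['359','246', 135']
--    con  s='1234123412341234' e k=3 la funzione restituisce la lista ['234',123']
--    con  s='987654321' e k=3 la funzione restituisce la lista []
--     '''
--     ls = []
--     start = 0
--
--     for ch in range(len(s)):
--         if lexic(str(s[start : k+start])) and len(set(s[start : k+start])) == k:
--             ls.append(str(s[start : k+start]))
--         start += 1
--
--     return sorted(list(set(ls)), reverse = True)
--
-- def lexic(lst):
--     return list(lst) == sorted(lst)
-- ===== SOURCE B (Python) =====
-- def es50(s, k):
--     # One right-to-left pass precomputes, for each position i, the length inc[i]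
--     # of the longest strictly increasing run starting at i; a length-k window at i
--     # is strictly increasing with distinct chars iff inc[i] >= k (O(1) per window).
--     if k < 0:
--         return []
--     n = len(s)
--     inc = [1] * n
--     for i in range(n - 2, -1, -1):
--         if s[i] < s[i + 1]:
--             inc[i] = inc[i + 1] + 1
--     subs = {s[i:i + k] for i in range(n) if i + k <= n and inc[i] >= k}
--     return sorted(subs, reverse=True)
-- ===== Notes on version B (the rewrite author's own statement) =====
-- stated objective: faster
-- what changed: A checks every window by building sorted(window) and set(window) (O(k log k) per start); B precomputes strictly-increasing run lengths in one right-to-left pass so each window is validated in O(1), then dedups with a set and sorts the final list once.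
import Mathlib
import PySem

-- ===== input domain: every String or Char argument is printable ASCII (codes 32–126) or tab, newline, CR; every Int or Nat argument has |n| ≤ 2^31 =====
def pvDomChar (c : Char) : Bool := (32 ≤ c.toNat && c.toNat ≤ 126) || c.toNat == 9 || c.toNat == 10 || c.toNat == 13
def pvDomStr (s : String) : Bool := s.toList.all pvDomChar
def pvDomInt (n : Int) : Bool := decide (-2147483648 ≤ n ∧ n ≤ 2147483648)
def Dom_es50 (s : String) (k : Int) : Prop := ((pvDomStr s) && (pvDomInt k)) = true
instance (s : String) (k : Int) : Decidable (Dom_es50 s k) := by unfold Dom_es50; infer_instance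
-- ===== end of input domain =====

-- B replaces A's per-window sort+set test by a right-to-left precomputed table of
-- strictly-increasing-run lengths (window valid iff run length ≥ k); objective: faster.

-- ===== PORT A =====
def lexicA (l : List Char) : Bool := l == PySem.List.sorted l (fun x => x) false

def es50 (s : String) (k : Int) : List String :=
  let cs := s.toList
  let res := (PySem.List.pyRange 0 (PySem.List.len cs) 1).foldl
      (fun (st : List String × Int) _ =>
        (if lexicA (PySem.List.slice cs (some st.2) (some (k + st.2))) &&
            (PySem.Set.len (PySem.Set.ofList (PySem.List.slice cs (some st.2) (some (k + st.2)))) == k)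
         then st.1 ++ [String.ofList (PySem.List.slice cs (some st.2) (some (k + st.2)))]
         else st.1,
         st.2 + 1))
      ([], 0)
  PySem.List.sorted (PySem.Set.ofList res.1) (fun x => x) true

-- ===== PORT B =====
def es50_alt (s : String) (k : Int) : List String :=
  if k < 0 then []
  else
    let cs := s.toList
    let n : Int := PySem.List.len cs
    let inc := (PySem.List.pyRange (n - 2) (-1) (-1)).foldl
        (fun inc i =>
          if PySem.List.pyGetD cs i ' ' < PySem.List.pyGetD cs (i + 1) ' '
          then PySem.List.pySetD inc i (PySem.List.pyGetD inc (i + 1) 0 + 1)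
          else inc)
        (List.replicate cs.length (1 : Int))
    let subs := (PySem.List.pyRange 0 n 1).foldl
        (fun (acc : PySem.Set String) i =>
          if i + k ≤ n ∧ k ≤ PySem.List.pyGetD inc i 0
          then PySem.Set.add acc (String.ofList (PySem.List.slice cs (some i) (some (i + k))))
          else acc)
        PySem.Set.empty
    PySem.List.sorted subs (fun x => x) true

-- ===== PRECONDITION & SPEC =====
def Spec_es50 (s : String) (k : Int) (out : List String) : Prop := out = es50_alt s k
instance (s : String) (k : Int) (out : List String) : Decidable (Spec_es50 s k out) := by unfold Spec_es50; infer_instance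

-- ===== CLAIM (what is proved, stated in full; the proofs are below) =====
def Claim_equal_es50 : Prop := ∀ (s : String) (k : Int), Dom_es50 s k → Spec_es50 s k (es50 s k)

-- ===== LEMMAS AND PROOFS =====

-- length of the longest strictly increasing run at the head of a list
def runLen : List Char → Nat
  | [] => 0
  | [_] => 1
  | a :: b :: t => if a < b then runLen (b :: t) + 1 else 1

lemma runLen_pos (a : Char) (t : List Char) : 1 ≤ runLen (a :: t) := by
  cases t
  · simp [runLen]
  · simp only [runLen]
    split <;> omega

-- shape of A's loop: accumulator = filterMap of the window-maker over the index range
lemma loopA (c : Int → Bool) (w : Int → String) :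
    ∀ (l : List Int) (ls0 : List String) (st0 : Int),
      l.foldl (fun (st : List String × Int) _ =>
          (if c st.2 then st.1 ++ [w st.2] else st.1, st.2 + 1)) (ls0, st0)
      = (ls0 ++ (PySem.List.pyRange st0 (st0 + l.length) 1).filterMap
            (fun i => if c i then some (w i) else none), st0 + l.length) := by
  intro l
  induction l with
  | nil => intro ls0 st0; simp [PySem.List.pyRange_one_eq_nil]
  | cons x t ih =>
    intro ls0 st0
    have hlen : (((x::t).length : Nat) : Int) = (t.length : Int) + 1 := by
      push_cast [List.length_cons]; ring
    rw [List.foldl_cons]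
    conv_rhs => rw [hlen]
    rw [PySem.List.pyRange_one_cons (show st0 < st0 + ((t.length : Int) + 1) by omega),
        List.filterMap_cons, ih]
    have harith : st0 + ((t.length : Int) + 1) = st0 + 1 + (t.length : Int) := by ring
    by_cases hc : c st0 <;> simp [hc, harith]

-- shape of B's set loop: filter first, then fold Set.add
lemma loopB (c : Int → Prop) [DecidablePred c] (w : Int → String) :
    ∀ (l : List Int) (acc : PySem.Set String),
      l.foldl (fun acc i => if c i then PySem.Set.add acc (w i) else acc) acc
      = (l.filterMap (fun i => if c i then some (w i) else none)).foldl PySem.Set.add acc := by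
  intro l
  induction l with
  | nil => intro acc; rfl
  | cons x t ih => intro acc; simp only [List.foldl_cons, List.filterMap_cons]; split <;> simp [ih]

-- fold length bounds for Set.add
lemma foldl_add_len_le {α : Type} [BEq α] [LawfulBEq α] :
    ∀ (l : List α) (acc : PySem.Set α), (l.foldl PySem.Set.add acc).length ≤ acc.length + l.length := by
  intro l
  induction l with
  | nil => simp
  | cons x t ih =>
    intro acc
    rw [List.foldl_cons]
    refine (ih _).trans ?_
    show (PySem.Set.add acc x).length + _ ≤ _
    unfold PySem.Set.add
    split
    · simp
    · simp
      omega

lemma foldl_add_len_eq {α : Type} [BEq α] [LawfulBEq α] :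
    ∀ (l : List α) (acc : PySem.Set α), ((l.foldl PySem.Set.add acc).length = acc.length + l.length ↔
      (l.Nodup ∧ ∀ x ∈ l, x ∉ acc)) := by
  intro l
  induction l with
  | nil => simp
  | cons x t ih =>
    intro acc
    rw [List.foldl_cons, List.nodup_cons]
    by_cases hx : x ∈ acc
    · have hadd : PySem.Set.add acc x = acc := by
        unfold PySem.Set.add; simp [hx]
      rw [hadd]
      have hle := foldl_add_len_le t acc
      constructor
      · intro h; simp at h; omega
      · rintro ⟨-, hall⟩; exact absurd hx (hall x (by simp))
    · have hadd : PySem.Set.add acc x = acc ++ [x] := by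
        unfold PySem.Set.add; simp [hx]
      have hlen : acc.length + (x :: t).length = (acc ++ [x]).length + t.length := by
        simp; omega
      rw [hadd, hlen, ih]
      constructor
      · rintro ⟨hnd, hall⟩
        refine ⟨⟨fun hxt => ?_, hnd⟩, fun y hy => ?_⟩
        · exact absurd (List.mem_append_right acc (by simp)) (hall x hxt)
        · rcases List.mem_cons.mp hy with h | hy'
          · subst h; exact hx
          · intro hyacc
            exact hall _ hy' (List.mem_append_left _ hyacc)
      · rintro ⟨⟨hxt, hnd⟩, hall⟩
        refine ⟨hnd, fun y hyt hyapp => ?_⟩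
        rcases List.mem_append.mp hyapp with h | h
        · exact hall y (by simp [hyt]) h
        · simp at h; subst h; exact hxt hyt

lemma ofList_length_le {α : Type} [BEq α] [LawfulBEq α] (l : List α) :
    (PySem.Set.ofList l).length ≤ l.length := by
  have := foldl_add_len_le l ([] : PySem.Set α)
  simpa [PySem.Set.ofList_eq_foldl] using this

lemma ofList_length_eq_iff {α : Type} [BEq α] [LawfulBEq α] (l : List α) :
    (PySem.Set.ofList l).length = l.length ↔ l.Nodup := by
  have := foldl_add_len_eq l ([] : PySem.Set α)
  simpa [PySem.Set.ofList_eq_foldl] using this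

lemma lexicA_iff (l : List Char) : lexicA l = true ↔ l.Pairwise (· ≤ ·) := by
  unfold lexicA
  rw [beq_iff_eq]
  constructor
  · intro h
    have := PySem.List.sorted_pairwise l (fun x => x)
    rw [← h] at this
    simpa using this
  · intro h
    exact (PySem.List.sorted_eq_self_of_pairwise l (fun x => x) (by simpa using h)).symm

-- runLen ≥ m iff the first m elements form a strictly increasing chain
lemma runLen_take (l : List Char) (m : Nat) (hm : m ≤ l.length) :
    List.IsChain (· < ·) (l.take m) ↔ m ≤ runLen l := by
  induction l generalizing m with
  | nil => simp at hm; subst hm; simp [runLen]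
  | cons a t ih =>
    cases m with
    | zero => simp
    | succ m' =>
      cases t with
      | nil =>
        simp at hm
        subst hm
        simp [runLen]
      | cons b u =>
        cases m' with
        | zero => simp [runLen_pos]
        | succ m'' =>
          rw [List.take_succ_cons, List.take_succ_cons, List.isChain_cons_cons]
          have h2 : runLen (a :: b :: u) = if a < b then runLen (b :: u) + 1 else 1 := rfl
          rw [← List.take_succ_cons, ih (m'' + 1) (by simpa using hm), h2]
          constructor
          · rintro ⟨hab, hr⟩; rw [if_pos hab]; omega
          · intro h
            split at h
            · exact ⟨by assumption, by omega⟩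
            · omega

lemma runLen_drop_step (cs : List Char) (m : Nat) (hm : m + 1 < cs.length) :
    runLen (cs.drop m) = if cs[m]'(by omega) < cs[m+1]'hm then (runLen (cs.drop (m+1))) + 1 else 1 := by
  rw [List.drop_eq_getElem_cons (by omega : m < cs.length), List.drop_eq_getElem_cons hm]
  rfl

lemma runLen_last (cs : List Char) (h : 0 < cs.length) :
    runLen (cs.drop (cs.length - 1)) = 1 := by
  rw [List.drop_eq_getElem_cons (by omega)]
  have h1 : cs.length - 1 + 1 = cs.length := by omega
  rw [h1, List.drop_length]
  rfl

-- B's first loop establishes inc[i] = runLen (drop i) from the invariant downwards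
lemma incFold (cs : List Char) :
    ∀ (m : Nat) (L : List Int), m < cs.length → L.length = cs.length →
      (∀ i, i < cs.length → L.getD i 0 = if m ≤ i then (runLen (cs.drop i) : Int) else 1) →
      ∀ i, i < cs.length →
        ((PySem.List.pyRange ((m : Int) - 1) (-1) (-1)).foldl
          (fun inc j =>
            if PySem.List.pyGetD cs j ' ' < PySem.List.pyGetD cs (j + 1) ' '
            then PySem.List.pySetD inc j (PySem.List.pyGetD inc (j + 1) 0 + 1)
            else inc) L).getD i 0 = (runLen (cs.drop i) : Int) := by
  intro m
  induction m with
  | zero =>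
    intro L hm hL hinv i hi
    rw [PySem.List.pyRange_neg_one_eq_nil (by omega)]
    simpa using (hinv i hi)
  | succ m ih =>
    intro L hm hL hinv i hi
    have hcast : ((m + 1 : Nat) : Int) - 1 = (m : Int) := by push_cast; ring
    rw [hcast, PySem.List.pyRange_neg_one_cons (by omega), List.foldl_cons]
    have hm1 : m + 1 < cs.length := hm
    have hml : m < cs.length := by omega
    have hg1 : PySem.List.pyGetD cs (m : Int) ' ' = cs[m]'hml := by
      simp [List.getD, List.getElem?_eq_getElem hml]
    have hg2 : PySem.List.pyGetD cs ((m : Int) + 1) ' ' = cs[m+1]'hm1 := by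
      have h1 : ((m : Int) + 1) = ((m + 1 : Nat) : Int) := by push_cast; ring
      rw [h1, PySem.List.pyGetD_natCast, List.getD_eq_getElem?_getD,
          List.getElem?_eq_getElem hm1, Option.getD_some]
    have hstep := runLen_drop_step cs m hm1
    by_cases hlt : cs[m]'hml < cs[m+1]'hm1
    · rw [if_pos (by rw [hg1, hg2]; exact hlt)]
      have hv : PySem.List.pyGetD L ((m : Int) + 1) 0 = (runLen (cs.drop (m+1)) : Int) := by
        have h1 : ((m : Int) + 1) = ((m + 1 : Nat) : Int) := by push_cast; ring
        rw [h1, PySem.List.pyGetD_natCast, hinv (m+1) hm1, if_pos (by omega)]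
      have hset : PySem.List.pySetD L (m : Int) (PySem.List.pyGetD L ((m : Int) + 1) 0 + 1)
          = L.set m ((runLen (cs.drop (m+1)) : Int) + 1) := by
        rw [hv]
        simp [PySem.List.pySetD, PySem.List.pySet?_natCast L m _ (by omega)]
      rw [hset]
      refine ih _ (by omega) (by simpa using hL) ?_ i hi
      intro j hj
      rcases Nat.lt_trichotomy j m with h | h | h
      · rw [List.getD_eq_getElem?_getD, List.getElem?_set, if_neg (by omega)]
        rw [← List.getD_eq_getElem?_getD, hinv j hj, if_neg (by omega), if_neg (by omega)]
      · subst h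
        rw [List.getD_eq_getElem?_getD, List.getElem?_set, if_pos rfl, if_pos (by omega)]
        rw [if_pos (by omega)]
        simp only [Option.getD_some]
        rw [hstep, if_pos hlt]
        push_cast; ring
      · rw [List.getD_eq_getElem?_getD, List.getElem?_set, if_neg (by omega)]
        rw [← List.getD_eq_getElem?_getD, hinv j hj, if_pos (by omega), if_pos (by omega)]
    · rw [if_neg (by rw [hg1, hg2]; exact hlt)]
      refine ih _ (by omega) hL ?_ i hi
      intro j hj
      rw [hinv j hj]
      rcases Nat.lt_trichotomy j m with h | h | h
      · rw [if_neg (by omega), if_neg (by omega)]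
      · subst h
        rw [if_neg (by omega), if_pos (by omega), hstep, if_neg hlt]
        norm_num
      · rw [if_pos (by omega), if_pos (by omega)]

-- the inc table computed by B's first loop
lemma inc_spec (cs : List Char) :
    ∀ i, i < cs.length →
      ((PySem.List.pyRange ((cs.length : Int) - 2) (-1) (-1)).foldl
        (fun inc j =>
          if PySem.List.pyGetD cs j ' ' < PySem.List.pyGetD cs (j + 1) ' '
          then PySem.List.pySetD inc j (PySem.List.pyGetD inc (j + 1) 0 + 1)
          else inc)
        (List.replicate cs.length (1 : Int))).getD i 0 = (runLen (cs.drop i) : Int) := by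
  intro i hi
  have hn : 1 ≤ cs.length := by omega
  have hcast : ((cs.length : Int) - 2) = ((cs.length - 1 : Nat) : Int) - 1 := by omega
  rw [hcast]
  refine incFold cs (cs.length - 1) _ (by omega) (by simp) ?_ i hi
  intro j hj
  rw [List.getD_eq_getElem?_getD, List.getElem?_replicate, if_pos hj, Option.getD_some]
  by_cases h : cs.length - 1 ≤ j
  · have hj' : j = cs.length - 1 := by omega
    subst hj'
    rw [if_pos h, runLen_last cs (by omega)]
    norm_num
  · rw [if_neg h]

-- the per-index condition of A equals the per-index condition of B (k ≥ 0, i < n)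
lemma cond_iff (cs : List Char) (k : Int) (hk : 0 ≤ k) (i : Nat) (hi : i < cs.length) :
    (lexicA (PySem.List.slice cs (some (i : Int)) (some (k + i))) &&
       (PySem.Set.len (PySem.Set.ofList (PySem.List.slice cs (some (i : Int)) (some (k + i)))) == k)) = true
    ↔ ((i : Int) + k ≤ (cs.length : Int) ∧ k ≤ (runLen (cs.drop i) : Int)) := by
  obtain ⟨kn, rfl⟩ : ∃ kn : Nat, k = (kn : Int) := ⟨k.toNat, by omega⟩
  have hw : PySem.List.slice cs (some (i : Int)) (some ((kn : Int) + i)) = (cs.drop i).take kn := by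
    rw [show ((kn : Int) + i) = ((i : Int) + (kn : Int)) from by ring]
    exact PySem.List.slice_natCast_add cs i kn
  rw [hw]
  set w := (cs.drop i).take kn with hwdef
  rw [Bool.and_eq_true, lexicA_iff, beq_iff_eq]
  have hlen_w : w.length = min kn (cs.length - i) := by simp [hwdef]
  have hwle : w.length ≤ kn := by omega
  have hsl : PySem.Set.len (PySem.Set.ofList w) = ((PySem.Set.ofList w).length : Int) := by
    simp [PySem.Set.len]
  rw [hsl]
  constructor
  · rintro ⟨hpw, hslen⟩
    have h1 : (PySem.Set.ofList w).length = kn := by exact_mod_cast hslen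
    have h2 : w.length = kn := le_antisymm hwle (h1 ▸ ofList_length_le w)
    have hnd : w.Nodup := (ofList_length_eq_iff w).mp (by rw [h1, h2])
    have hplt : w.Pairwise (· < ·) := (hpw.and hnd).imp fun ⟨a, b⟩ => lt_of_le_of_ne a b
    have hik : i + kn ≤ cs.length := by omega
    refine ⟨by omega, ?_⟩
    have := (runLen_take (cs.drop i) kn (by simp; omega)).mp (List.isChain_iff_pairwise.mpr hplt)
    exact_mod_cast this
  · rintro ⟨h1, h2⟩
    have h1' : i + kn ≤ cs.length := by omega
    have h2' : kn ≤ runLen (cs.drop i) := by exact_mod_cast h2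
    have hchain := (runLen_take (cs.drop i) kn (by simp; omega)).mpr h2'
    have hplt : w.Pairwise (· < ·) := List.isChain_iff_pairwise.mp hchain
    have hnd : w.Nodup := hplt.imp ne_of_lt
    have hwl : w.length = kn := by omega
    refine ⟨hplt.imp le_of_lt, ?_⟩
    rw [(ofList_length_eq_iff w).mpr hnd, hwl]

-- ===== VERDICT (by name: the statement is the Claim_ definition above) =====
theorem es50_spec : Claim_equal_es50 := by
  intro s k _
  simp only [Spec_es50, es50, es50_alt, PySem.List.len_eq]
  set cs := s.toList with hcs
  rw [loopA (fun i => lexicA (PySem.List.slice cs (some i) (some (k + i))) &&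
        (PySem.Set.len (PySem.Set.ofList (PySem.List.slice cs (some i) (some (k + i)))) == k))
      (fun i => String.ofList (PySem.List.slice cs (some i) (some (k + i))))]
  simp only [PySem.List.length_pyRange_one, sub_zero, Int.toNat_natCast, zero_add, List.nil_append]
  by_cases hk : k < 0
  · rw [if_pos hk]
    have hnil : ∀ i : Int,
        (if (lexicA (PySem.List.slice cs (some i) (some (k + i))) &&
            (PySem.Set.len (PySem.Set.ofList (PySem.List.slice cs (some i) (some (k + i)))) == k)) = true
         then some (String.ofList (PySem.List.slice cs (some i) (some (k + i)))) else none) = none := by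
      intro i
      rw [if_neg]
      simp only [Bool.and_eq_true, beq_iff_eq]
      rintro ⟨-, h⟩
      have : (0 : Int) ≤ ((PySem.Set.ofList (PySem.List.slice cs (some i) (some (k + i)))).length : Int) := by positivity
      simp [PySem.Set.len] at h
      omega
    rw [List.filterMap_eq_nil_iff.mpr (fun i _ => hnil i)]
    rfl
  · rw [if_neg hk]
    rw [not_lt] at hk
    have hloopB := loopB
        (fun i => i + k ≤ ((cs.length : Nat) : Int) ∧ k ≤ PySem.List.pyGetD
          ((PySem.List.pyRange ((cs.length : Int) - 2) (-1) (-1)).foldl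
            (fun inc j =>
              if PySem.List.pyGetD cs j ' ' < PySem.List.pyGetD cs (j + 1) ' '
              then PySem.List.pySetD inc j (PySem.List.pyGetD inc (j + 1) 0 + 1)
              else inc)
            (List.replicate cs.length (1 : Int))) i 0)
        (fun i => String.ofList (PySem.List.slice cs (some i) (some (i + k))))
        (PySem.List.pyRange 0 ((cs.length : Nat) : Int) 1) ([] : PySem.Set String)
    refine Eq.trans ?_ ((congrArg (fun t => PySem.List.sorted t (fun x => x) true) hloopB).symm)
    rw [← PySem.Set.ofList_eq_foldl]
    congr 2
    apply List.filterMap_congr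
    intro x hx
    rw [PySem.List.mem_pyRange_one] at hx
    obtain ⟨j, rfl⟩ : ∃ j : Nat, x = (j : Int) := ⟨x.toNat, by omega⟩
    have hj : j < cs.length := by omega
    have hci := cond_iff cs k hk j hj
    have hinc : PySem.List.pyGetD
        ((PySem.List.pyRange ((cs.length : Int) - 2) (-1) (-1)).foldl
          (fun inc j =>
            if PySem.List.pyGetD cs j ' ' < PySem.List.pyGetD cs (j + 1) ' '
            then PySem.List.pySetD inc j (PySem.List.pyGetD inc (j + 1) 0 + 1)
            else inc)
          (List.replicate cs.length (1 : Int))) (j : Int) 0 = (runLen (cs.drop j) : Int) := by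
      rw [PySem.List.pyGetD_natCast]
      exact inc_spec cs j hj
    have hcomm : k + (j : Int) = (j : Int) + k := by ring
    by_cases hcond : ((j : Int) + k ≤ (cs.length : Int) ∧ k ≤ (runLen (cs.drop j) : Int))
    · rw [if_pos (hci.mpr hcond), if_pos (by rw [hinc]; exact hcond), hcomm]
    · rw [if_neg (fun h => hcond (hci.mp h)), if_neg (by rw [hinc]; exact hcond)]
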